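-- pv_equiv track=rewrite | github.com/MarioRodriguezuc3m/TFG_Diario | Prueba_aco.py | generar_aristas
-- ===== SOURCE A (Python) =====
-- from typing import List, Dict, Tuple, Set
-- from collections import defaultdict
--
-- def generar_aristas(nodos: List[Tuple], orden_consultas: Dict) -> Dict[Tuple, List[Tuple]]:
--     aristas = defaultdict(list)
--     for nodo1 in nodos:
--         for nodo2 in nodos:
--             if nodo1 == nodo2:
--                 continue
--
--             p1, c1, h1, m1 = nodo1
--             p2, c2, h2, m2 = nodo2
--
--             # Restricciones
--             misma_hora_medico = (m1 == m2 and h1 == h2)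
--             misma_hora_consulta = (c1 == c2 and h1 == h2)
--
--             if not misma_hora_medico and not misma_hora_consulta:
--                 aristas[nodo1].append(nodo2)
--
--     return aristas
-- ===== SOURCE B (Python) =====
-- from collections import defaultdict
--
-- def generar_aristas(nodos, orden_consultas):
--     # Positional-index algorithm (alternative to the pairwise scan): record for every (medico,hora) and
--     # (consulta,hora) group the positions of its nodes; each node's
--     # neighbour list is then produced by concatenating the slices of
--     # `nodos` between its sorted conflict positions, instead of testing
--     # every ordered pair.
--     idx_m = defaultdict(list)
--     idx_c = defaultdict(list)
--     for i, (p, c, h, m) in enumerate(nodos):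
--         idx_m[(m, h)].append(i)
--         idx_c[(c, h)].append(i)
--     aristas = defaultdict(list)
--     for nodo1 in nodos:
--         p1, c1, h1, m1 = nodo1
--         cortes = sorted(set(idx_m[(m1, h1)]) | set(idx_c[(c1, h1)]))
--         vecinos = []
--         prev = 0
--         for j in cortes:
--             vecinos.extend(nodos[prev:j])
--             prev = j + 1
--         vecinos.extend(nodos[prev:])
--         if vecinos:
--             aristas[nodo1].extend(vecinos)
--     return aristas
-- ===== Notes on version B (the rewrite author's own statement) =====
-- stated objective: alternative
-- what changed: B records each node's position in (medico,hora)/(consulta,hora) position-index lists and builds every neighbour list by concatenating the slices of nodos between that node's sorted conflict positions, eliminating A's per-ordered-pair conflict test.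
import Mathlib
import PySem

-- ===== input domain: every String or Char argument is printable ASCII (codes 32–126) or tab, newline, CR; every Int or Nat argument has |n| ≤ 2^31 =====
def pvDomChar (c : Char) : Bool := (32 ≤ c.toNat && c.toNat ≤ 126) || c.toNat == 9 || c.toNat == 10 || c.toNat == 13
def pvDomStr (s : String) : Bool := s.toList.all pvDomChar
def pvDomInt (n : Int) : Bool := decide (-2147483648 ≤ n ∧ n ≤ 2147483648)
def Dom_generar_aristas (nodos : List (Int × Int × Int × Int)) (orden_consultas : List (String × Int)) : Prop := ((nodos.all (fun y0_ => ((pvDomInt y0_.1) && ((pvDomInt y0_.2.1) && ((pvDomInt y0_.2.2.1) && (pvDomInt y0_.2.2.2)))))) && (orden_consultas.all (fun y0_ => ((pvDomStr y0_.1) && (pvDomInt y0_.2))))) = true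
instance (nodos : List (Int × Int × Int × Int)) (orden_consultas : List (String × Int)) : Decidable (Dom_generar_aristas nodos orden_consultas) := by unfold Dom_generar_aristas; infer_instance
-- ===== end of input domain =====

-- B replaces A's per-ordered-pair conflict test by position indices per (medico,hora)/(consulta,hora):
-- each neighbour list is assembled from slices of nodos between the node's sorted conflict positions
-- (objective: alternative algorithm; equality of return values is proved).

-- ===== PORT A =====
def generar_aristas (nodos : List (Int × Int × Int × Int)) (orden_consultas : List (String × Int)) : List (Int × Int × Int × Int × List (Int × Int × Int × Int)) :=
  ((nodos.foldl (fun aristas nodo1 =>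
      nodos.foldl (fun aristas nodo2 =>
        if nodo1 == nodo2 then aristas
        else
          let (_p1, c1, h1, m1) := nodo1
          let (_p2, c2, h2, m2) := nodo2
          let misma_hora_medico := m1 == m2 && h1 == h2
          let misma_hora_consulta := c1 == c2 && h1 == h2
          if !misma_hora_medico && !misma_hora_consulta then
            aristas.modify nodo1 [] (fun vs => vs ++ [nodo2])
          else aristas) aristas)
    (PySem.Dict.empty : PySem.Dict (Int × Int × Int × Int) (List (Int × Int × Int × Int)))).items.map
      (fun it => (it.1.1, it.1.2.1, it.1.2.2.1, it.1.2.2.2, it.2)))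

-- ===== PORT B =====
def generar_aristas_alt (nodos : List (Int × Int × Int × Int)) (orden_consultas : List (String × Int)) : List (Int × Int × Int × Int × List (Int × Int × Int × Int)) :=
  let idx :=
    (PySem.List.enumerate nodos 0).foldl (fun idx it =>
        let i := it.1
        let (_p, c, h, m) := it.2
        (idx.1.modify (m, h) [] (fun l => l ++ [i]),
         idx.2.modify (c, h) [] (fun l => l ++ [i])))
      ((PySem.Dict.empty : PySem.Dict (Int × Int) (List Int)),
       (PySem.Dict.empty : PySem.Dict (Int × Int) (List Int)))
  ((nodos.foldl (fun aristas nodo1 =>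
      let (_p1, c1, h1, m1) := nodo1
      let cortes := PySem.List.sorted
        (PySem.Set.union (PySem.Set.ofList (idx.1.getD (m1, h1) []))
                         (PySem.Set.ofList (idx.2.getD (c1, h1) [])))
        (fun x => x)
      let s := cortes.foldl
        (fun (s : List (Int × Int × Int × Int) × Int) j =>
          (s.1 ++ PySem.List.slice nodos (some s.2) (some j), j + 1))
        ([], 0)
      let vecinos := s.1 ++ PySem.List.slice nodos (some s.2) none
      if vecinos.isEmpty then aristas
      else aristas.modify nodo1 [] (fun vs => vs ++ vecinos))
    (PySem.Dict.empty : PySem.Dict (Int × Int × Int × Int) (List (Int × Int × Int × Int)))).items.map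
      (fun it => (it.1.1, it.1.2.1, it.1.2.2.1, it.1.2.2.2, it.2)))

-- ===== PRECONDITION & SPEC =====
def Spec_generar_aristas (nodos : List (Int × Int × Int × Int)) (orden_consultas : List (String × Int)) (out : List (Int × Int × Int × Int × List (Int × Int × Int × Int))) : Prop := out = generar_aristas_alt nodos orden_consultas
instance (nodos : List (Int × Int × Int × Int)) (orden_consultas : List (String × Int)) (out : List (Int × Int × Int × Int × List (Int × Int × Int × Int))) : Decidable (Spec_generar_aristas nodos orden_consultas out) := by
  unfold Spec_generar_aristas
  letI d4 : DecidableEq (Int × Int × Int × Int) := inferInstance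
  letI dl : DecidableEq (List (Int × Int × Int × Int)) := instDecidableEqList
  letI e1 : DecidableEq (Int × List (Int × Int × Int × Int)) := instDecidableEqProd
  letI e2 : DecidableEq (Int × Int × List (Int × Int × Int × Int)) := instDecidableEqProd
  letI e3 : DecidableEq (Int × Int × Int × List (Int × Int × Int × Int)) := instDecidableEqProd
  letI e4 : DecidableEq (Int × Int × Int × Int × List (Int × Int × Int × Int)) := instDecidableEqProd
  exact instDecidableEqList out (generar_aristas_alt nodos orden_consultas)

-- ===== CLAIM (what is proved, stated in full; the proofs are below) =====
def Claim_equal_generar_aristas : Prop := ∀ (nodos : List (Int × Int × Int × Int)) (orden_consultas : List (String × Int)), Dom_generar_aristas nodos orden_consultas → Spec_generar_aristas nodos orden_consultas (generar_aristas nodos orden_consultas)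

-- ===== LEMMAS AND PROOFS =====

def pvKeyM (n : Int × Int × Int × Int) : Int × Int := (n.2.2.2, n.2.2.1)
def pvKeyC (n : Int × Int × Int × Int) : Int × Int := (n.2.1, n.2.2.1)

-- node n2 conflicts with nodo1 (same medico+hour or same consulta+hour)
def pvConf (n1 n2 : Int × Int × Int × Int) : Bool :=
  (pvKeyM n2 == pvKeyM n1) || (pvKeyC n2 == pvKeyC n1)

-- the pair-condition A applies to each ordered pair, as one boolean predicate
def pvQA (nodo1 n2 : Int × Int × Int × Int) : Bool :=
  !(nodo1 == n2)
    && (!(nodo1.2.2.2 == n2.2.2.2 && nodo1.2.2.1 == n2.2.2.1)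
        && !(nodo1.2.1 == n2.2.1 && nodo1.2.2.1 == n2.2.2.1))

lemma pvQA_eq_not_conf (n1 n2 : Int × Int × Int × Int) : pvQA n1 n2 = !(pvConf n1 n2) := by
  obtain ⟨p1, c1, h1, m1⟩ := n1
  obtain ⟨p2, c2, h2, m2⟩ := n2
  by_cases hh : h1 = h2
  · subst hh
    by_cases hm : m1 = m2
    · subst hm; simp [pvQA, pvConf, pvKeyM, pvKeyC]
    · by_cases hc : c1 = c2
      · subst hc; simp [pvQA, pvConf, pvKeyM, pvKeyC]
      · have e1 : (m1 == m2) = false := by simp [hm]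
        have e2 : (c1 == c2) = false := by simp [hc]
        have e3 : (((m2, h1) : Int × Int) == (m1, h1)) = false := by
          simp only [beq_eq_false_iff_ne, ne_eq, Prod.mk.injEq, not_and]
          exact fun h _ => hm h.symm
        have e4 : (((c2, h1) : Int × Int) == (c1, h1)) = false := by
          simp only [beq_eq_false_iff_ne, ne_eq, Prod.mk.injEq, not_and]
          exact fun h _ => hc h.symm
        have e5 : (((p1, c1, h1, m1) : Int × Int × Int × Int) == (p2, c2, h1, m2)) = false := by
          simp only [beq_eq_false_iff_ne, ne_eq, Prod.mk.injEq]
          rintro ⟨-, -, -, h⟩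
          exact hm h
        simp [pvQA, pvConf, pvKeyM, pvKeyC, e1, e2, e3, e4, e5]
  · have eh : (h1 == h2) = false := by simp [hh]
    have e3 : (((m2, h2) : Int × Int) == (m1, h1)) = false := by
      simp only [beq_eq_false_iff_ne, ne_eq, Prod.mk.injEq, not_and]
      exact fun _ h => hh h.symm
    have e4 : (((c2, h2) : Int × Int) == (c1, h1)) = false := by
      simp only [beq_eq_false_iff_ne, ne_eq, Prod.mk.injEq, not_and]
      exact fun _ h => hh h.symm
    have e5 : (((p1, c1, h1, m1) : Int × Int × Int × Int) == (p2, c2, h2, m2)) = false := by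
      simp only [beq_eq_false_iff_ne, ne_eq, Prod.mk.injEq]
      rintro ⟨-, -, h, -⟩
      exact hh h
    simp [pvQA, pvConf, pvKeyM, pvKeyC, eh, e3, e4, e5]

-- A's inner step, rewritten as a single guarded append
lemma pv_stepA (nodo1 : Int × Int × Int × Int) :
    (fun (aristas : PySem.Dict (Int × Int × Int × Int) (List (Int × Int × Int × Int))) nodo2 =>
      if nodo1 == nodo2 then aristas
      else
        let (_p1, c1, h1, m1) := nodo1
        let (_p2, c2, h2, m2) := nodo2
        let misma_hora_medico := m1 == m2 && h1 == h2
        let misma_hora_consulta := c1 == c2 && h1 == h2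
        if !misma_hora_medico && !misma_hora_consulta then
          aristas.modify nodo1 [] (fun vs => vs ++ [nodo2])
        else aristas)
    = (fun aristas n2 =>
        if pvQA nodo1 n2 then aristas.modify nodo1 [] (fun vs => vs ++ [n2]) else aristas) := by
  funext ar n2
  obtain ⟨p1, c1, h1, m1⟩ := nodo1
  obtain ⟨p2, c2, h2, m2⟩ := n2
  by_cases he : (((p1, c1, h1, m1) : Int × Int × Int × Int) == (p2, c2, h2, m2)) = true
  · simp [pvQA, he]
  · by_cases hb : (!(m1 == m2 && h1 == h2) && !(c1 == c2 && h1 == h2)) = true <;>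
      simp [pvQA, he]

-- a conditional-append loop into one defaultdict(list) key equals one conditional extend with the filtered list
lemma pv_foldl_append (k0 : Int × Int × Int × Int) (q : (Int × Int × Int × Int) → Bool)
    (l : List (Int × Int × Int × Int)) :
    ∀ (ar : PySem.Dict (Int × Int × Int × Int) (List (Int × Int × Int × Int))),
    l.foldl (fun ar n2 => if q n2 then ar.modify k0 [] (fun vs => vs ++ [n2]) else ar) ar
      = (if (l.filter q).isEmpty then ar else ar.modify k0 [] (fun vs => vs ++ l.filter q)) := by
  induction l with
  | nil => intro ar; simp
  | cons x l ih =>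
      intro ar
      rw [List.foldl_cons]
      by_cases hq : q x
      · rw [if_pos hq, ih, List.filter_cons_of_pos hq]
        by_cases he : (l.filter q).isEmpty
        · rw [if_pos he, List.isEmpty_iff.mp he]
          simp
        · rw [if_neg he]
          simp [PySem.Dict.modify, PySem.Dict.getD_insert_self, PySem.Dict.insert_insert_self]
      · rw [if_neg hq, ih, List.filter_cons_of_neg hq]

-- B's index-building pass, abstracted over the key
def pvIdxStep (key : (Int × Int × Int × Int) → Int × Int)
    (d : PySem.Dict (Int × Int) (List Int)) (it : Int × Int × Int × Int × Int) :
    PySem.Dict (Int × Int) (List Int) :=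
  d.modify (key it.2) [] (fun l => l ++ [it.1])

-- B's single pass over a pair of dicts is the pair of the two key-indexed passes
lemma pv_idx_pair (li : List (Int × Int × Int × Int × Int)) :
    ∀ (a b : PySem.Dict (Int × Int) (List Int)),
    li.foldl (fun idx it =>
        let i := it.1
        let (_p, c, h, m) := it.2
        (idx.1.modify (m, h) [] (fun l => l ++ [i]),
         idx.2.modify (c, h) [] (fun l => l ++ [i]))) (a, b)
      = (li.foldl (pvIdxStep pvKeyM) a, li.foldl (pvIdxStep pvKeyC) b) := by
  induction li with
  | nil => intro a b; rfl
  | cons x l ih =>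
      intro a b
      obtain ⟨i, p, c, h, m⟩ := x
      simpa [pvIdxStep, pvKeyM, pvKeyC] using ih _ _

-- the bucket of key k holds the first components of the items whose key is k, in order
lemma pv_bucket (key : (Int × Int × Int × Int) → Int × Int) (li : List (Int × Int × Int × Int × Int)) :
    ∀ (d : PySem.Dict (Int × Int) (List Int)) (k : Int × Int),
    (li.foldl (pvIdxStep key) d).getD k []
      = d.getD k [] ++ (li.filter (fun it => key it.2 == k)).map (fun it => it.1) := by
  induction li with
  | nil => intro d k; simp
  | cons x l ih =>
      intro d k
      rw [List.foldl_cons, ih]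
      unfold pvIdxStep
      rw [PySem.Dict.getD_modify]
      by_cases hk : k = key x.2
      · rw [if_pos hk, List.filter_cons_of_pos (by simp [hk]), List.map_cons, List.append_assoc,
          hk]
        rfl
      · rw [if_neg hk, List.filter_cons_of_neg
          (by simp only [beq_iff_eq]; exact fun h => hk h.symm)]

-- conflict positions of the suffix starting at index s
def pvCut (P : (Int × Int × Int × Int) → Bool) (l : List (Int × Int × Int × Int)) (s : Int) : List Int :=
  ((PySem.List.enumerate l s).filter (fun it => P it.2)).map (fun it => it.1)

lemma pvCut_nil (P : (Int × Int × Int × Int) → Bool) (s : Int) : pvCut P [] s = [] := rfl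

lemma pvCut_cons (P : (Int × Int × Int × Int) → Bool) (x : Int × Int × Int × Int)
    (l : List (Int × Int × Int × Int)) (s : Int) :
    pvCut P (x :: l) s = (if P x then [s] else []) ++ pvCut P l (s + 1) := by
  by_cases h : P x <;> simp [pvCut, PySem.List.enumerate_cons, h]

lemma pvCut_ge (P : (Int × Int × Int × Int) → Bool) (l : List (Int × Int × Int × Int)) (s j : Int)
    (h : j ∈ pvCut P l s) : s ≤ j := by
  have hj : j ∈ (PySem.List.enumerate l s).map (fun it => it.1) := by
    rcases List.mem_map.mp h with ⟨it, hit, rfl⟩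
    exact List.mem_map_of_mem (List.mem_of_mem_filter hit)
  rw [PySem.List.map_fst_enumerate] at hj
  exact (PySem.List.mem_pyRange_one.mp hj).1

lemma pvCut_sublist (P : (Int × Int × Int × Int) → Bool) (l : List (Int × Int × Int × Int)) (s : Int) :
    (pvCut P l s).Sublist (PySem.List.pyRange s (s + l.length)) := by
  rw [← PySem.List.map_fst_enumerate]
  exact List.Sublist.map _ List.filter_sublist

lemma pvCut_pairwise (P : (Int × Int × Int × Int) → Bool) (l : List (Int × Int × Int × Int)) (s : Int) :
    (pvCut P l s).Pairwise (· < ·) :=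
  (PySem.List.pairwise_lt_pyRange_one s (s + l.length)).sublist (pvCut_sublist P l s)

lemma pvCut_nodup (P : (Int × Int × Int × Int) → Bool) (l : List (Int × Int × Int × Int)) (s : Int) :
    (pvCut P l s).Nodup :=
  (PySem.List.nodup_pyRange_one s (s + l.length)).sublist (pvCut_sublist P l s)

lemma pvCut_mem (P : (Int × Int × Int × Int) → Bool) (l : List (Int × Int × Int × Int)) (s j : Int) :
    j ∈ pvCut P l s ↔ ∃ it ∈ PySem.List.enumerate l s, P it.2 ∧ it.1 = j := by
  simp only [pvCut, List.mem_map, List.mem_filter]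
  constructor
  · rintro ⟨it, ⟨h1, h2⟩, rfl⟩; exact ⟨it, h1, h2, rfl⟩
  · rintro ⟨it, h1, h2, rfl⟩; exact ⟨it, ⟨h1, h2⟩, rfl⟩

-- sorted(set(bucketM) | set(bucketC)) is exactly the increasing list of conflict positions
lemma pv_cortes (n1 : Int × Int × Int × Int) (nodos : List (Int × Int × Int × Int)) :
    PySem.List.sorted
      (PySem.Set.union
        (PySem.Set.ofList ((((PySem.List.enumerate nodos 0).filter (fun it => pvKeyM it.2 == pvKeyM n1)).map (fun it => it.1))))
        (PySem.Set.ofList ((((PySem.List.enumerate nodos 0).filter (fun it => pvKeyC it.2 == pvKeyC n1)).map (fun it => it.1)))))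
      (fun x => x)
      = pvCut (pvConf n1) nodos 0 := by
  apply PySem.List.sorted_eq_of_perm_of_pairwise_lt
  · rw [List.perm_ext_iff_of_nodup (pvCut_nodup _ _ _) (PySem.Set.nodup_union _ _ (PySem.Set.nodup_ofList _))]
    intro j
    rw [PySem.Set.mem_union, PySem.Set.mem_ofList, PySem.Set.mem_ofList, pvCut_mem]
    simp only [List.mem_map, List.mem_filter, pvConf, Bool.or_eq_true]
    constructor
    · rintro ⟨it, h1, (h2 | h2), rfl⟩
      · exact Or.inl ⟨it, ⟨h1, h2⟩, rfl⟩
      · exact Or.inr ⟨it, ⟨h1, h2⟩, rfl⟩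
    · rintro (⟨it, ⟨h1, h2⟩, rfl⟩ | ⟨it, ⟨h1, h2⟩, rfl⟩)
      · exact ⟨it, h1, Or.inl h2, rfl⟩
      · exact ⟨it, h1, Or.inr h2, rfl⟩
  · exact pvCut_pairwise _ _ _

-- the slice-concatenation loop of Source B, as one function of (cut, acc, prev)
def pvGather (l : List (Int × Int × Int × Int)) (cut : List Int)
    (acc : List (Int × Int × Int × Int)) (prev : Int) : List (Int × Int × Int × Int) :=
  let s := cut.foldl
    (fun (s : List (Int × Int × Int × Int) × Int) j =>
      (s.1 ++ PySem.List.slice l (some s.2) (some j), j + 1)) (acc, prev)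
  s.1 ++ PySem.List.slice l (some s.2) none

lemma pvGather_shift (l : List (Int × Int × Int × Int)) (cut : List Int) (x : Int × Int × Int × Int)
    (acc : List (Int × Int × Int × Int)) (prev : Nat)
    (hdrop : l.drop prev = x :: l.drop (prev + 1))
    (hcut : ∀ j ∈ cut, (prev : Int) + 1 ≤ j) :
    pvGather l cut acc (prev : Int) = pvGather l cut (acc ++ [x]) ((prev : Int) + 1) := by
  cases cut with
  | nil =>
      show acc ++ PySem.List.slice l (some (prev : Int)) none
        = (acc ++ [x]) ++ PySem.List.slice l (some ((prev : Int) + 1)) none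
      have : ((prev : Int) + 1) = ((prev + 1 : Nat) : Int) := by push_cast; ring
      rw [this, PySem.List.slice_from_natCast, PySem.List.slice_from_natCast, hdrop,
        List.append_assoc]
      rfl
  | cons j rest =>
      have hj : (prev : Int) + 1 ≤ j := hcut j (List.mem_cons_self)
      have h0j : (0 : Int) ≤ j := by omega
      have hslice : PySem.List.slice l (some (prev : Int)) (some j)
          = x :: PySem.List.slice l (some ((prev : Int) + 1)) (some j) := by
        have h1 : ((prev : Int) + 1) = ((prev + 1 : Nat) : Int) := by push_cast; ring
        rw [h1, PySem.List.slice_toNat l (a := ((prev : Nat) : Int)) (Int.natCast_nonneg _) h0j,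
          PySem.List.slice_toNat l (a := (((prev + 1 : Nat)) : Int)) (Int.natCast_nonneg _) h0j]
        simp only [Int.toNat_natCast]
        have hn : j.toNat - prev = (j.toNat - (prev + 1)) + 1 := by omega
        rw [hn, hdrop, List.take_succ_cons]
      show pvGather l rest (acc ++ PySem.List.slice l (some (prev : Int)) (some j)) (j + 1)
        = pvGather l rest ((acc ++ [x]) ++ PySem.List.slice l (some ((prev : Int) + 1)) (some j)) (j + 1)
      rw [hslice, List.append_assoc]
      rfl

lemma pvGather_spec (l : List (Int × Int × Int × Int)) (P : (Int × Int × Int × Int) → Bool) :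
    ∀ (suf : List (Int × Int × Int × Int)) (prev : Nat) (acc : List (Int × Int × Int × Int)),
    l.drop prev = suf →
    pvGather l (pvCut P suf (prev : Int)) acc (prev : Int) = acc ++ suf.filter (fun x => !(P x)) := by
  intro suf
  induction suf with
  | nil =>
      intro prev acc h
      rw [pvCut_nil]
      show acc ++ PySem.List.slice l (some (prev : Int)) none = acc ++ []
      rw [PySem.List.slice_from_natCast, h]
  | cons x rest ih =>
      intro prev acc h
      have hdrop1 : l.drop (prev + 1) = rest := by
        have : l.drop (prev + 1) = (l.drop prev).drop 1 := by
          rw [List.drop_drop]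
        rw [this, h]
        rfl
      have hcast : ((prev : Int) + 1) = ((prev + 1 : Nat) : Int) := by push_cast; ring
      rw [pvCut_cons]
      by_cases hp : P x
      · rw [if_pos hp]
        show pvGather l ((prev : Int) :: pvCut P rest ((prev : Int) + 1)) acc (prev : Int) = _
        have hstep : pvGather l ((prev : Int) :: pvCut P rest ((prev : Int) + 1)) acc (prev : Int)
            = pvGather l (pvCut P rest ((prev : Int) + 1))
                (acc ++ PySem.List.slice l (some (prev : Int)) (some (prev : Int))) ((prev : Int) + 1) := rfl
        rw [hstep, PySem.List.slice_natCast, Nat.sub_self, List.take_zero, List.append_nil,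
          hcast, ih (prev + 1) acc (by rw [hdrop1])]
        rw [List.filter_cons_of_neg (by simp [hp])]
      · rw [if_neg hp, List.nil_append]
        have hshift := pvGather_shift l (pvCut P rest ((prev : Int) + 1)) x acc prev
          (by rw [h, hdrop1])
          (fun j hj => by rw [hcast] at hj ⊢; exact pvCut_ge _ _ _ _ hj)
        rw [hshift, hcast, ih (prev + 1) (acc ++ [x]) (by rw [hdrop1])]
        rw [List.filter_cons_of_pos (by simp [hp]), List.append_assoc]
        rfl

theorem generar_aristas_eq (nodos : List (Int × Int × Int × Int)) (orden_consultas : List (String × Int)) :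
    generar_aristas nodos orden_consultas = generar_aristas_alt nodos orden_consultas := by
  simp only [generar_aristas, generar_aristas_alt]
  rw [pv_idx_pair]
  refine congrArg (fun d : PySem.Dict (Int × Int × Int × Int) (List (Int × Int × Int × Int)) =>
    d.items.map (fun it => (it.1.1, it.1.2.1, it.1.2.2.1, it.1.2.2.2, it.2))) ?_
  refine congrArg (fun f => nodos.foldl f
    (PySem.Dict.empty : PySem.Dict (Int × Int × Int × Int) (List (Int × Int × Int × Int)))) ?_
  funext ar nodo1
  rw [pv_stepA nodo1, pv_foldl_append nodo1 (pvQA nodo1) nodos ar]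
  obtain ⟨p1, c1, h1, m1⟩ := nodo1
  have hfilter : nodos.filter (pvQA (p1, c1, h1, m1))
      = nodos.filter (fun x => !(pvConf (p1, c1, h1, m1) x)) := by
    apply List.filter_congr
    intro n2 _
    exact pvQA_eq_not_conf _ n2
  have hbucketM := pv_bucket pvKeyM (PySem.List.enumerate nodos 0) PySem.Dict.empty
    (pvKeyM (p1, c1, h1, m1))
  have hbucketC := pv_bucket pvKeyC (PySem.List.enumerate nodos 0) PySem.Dict.empty
    (pvKeyC (p1, c1, h1, m1))
  simp only [PySem.Dict.getD_empty, List.nil_append] at hbucketM hbucketC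
  show (if (nodos.filter (pvQA (p1, c1, h1, m1))).isEmpty then ar else _) = _
  have hvec :
      pvGather nodos
        (PySem.List.sorted
          (PySem.Set.union
            (PySem.Set.ofList (((PySem.List.enumerate nodos 0).foldl (pvIdxStep pvKeyM) PySem.Dict.empty).getD (m1, h1) []))
            (PySem.Set.ofList (((PySem.List.enumerate nodos 0).foldl (pvIdxStep pvKeyC) PySem.Dict.empty).getD (c1, h1) [])))
          (fun x => x))
        [] 0
      = nodos.filter (fun x => !(pvConf (p1, c1, h1, m1) x)) := by
    have hm : ((m1, h1) : Int × Int) = pvKeyM (p1, c1, h1, m1) := rfl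
    have hc : ((c1, h1) : Int × Int) = pvKeyC (p1, c1, h1, m1) := rfl
    rw [hm, hc, hbucketM, hbucketC, pv_cortes (p1, c1, h1, m1) nodos]
    have := pvGather_spec nodos (pvConf (p1, c1, h1, m1)) nodos 0 [] (by simp)
    simpa using this
  rw [hfilter, ← hvec]
  rfl

-- ===== VERDICT (by name: the statement is the Claim_ definition above) =====
theorem generar_aristas_spec : Claim_equal_generar_aristas := by
  intro nodos orden_consultas _
  unfold Spec_generar_aristas
  exact generar_aristas_eq nodos orden_consultas
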